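-- pv_equiv track=rewrite | github.com/ClayAucoin/BeamNG | beamng/extract/beamng_zip_extract_v3_popup.py | categorize_info_paths
-- ===== SOURCE A (Python) =====
-- from typing import Dict, List, Optional, Tuple
--
-- def top_level_from_internal(path: str) -> str:
--     p = path.replace("\\", "/").lstrip("/")
--     return (p.split("/")[0] if p else "").lower()
--
-- def categorize_info_paths(paths: List[str]) -> Tuple[List[str], List[str], List[str], List[str]]:
--     levels, vehicles, mod_info, other = [], [], [], []
--     for p in paths:
--         top = top_level_from_internal(p)
--         if top == "levels":
--             levels.append(p)
--         elif top == "vehicles":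
--             vehicles.append(p)
--         elif top == "mod_info":
--             mod_info.append(p)
--         else:
--             other.append(p)
--     return levels, vehicles, mod_info, other
-- ===== SOURCE B (Python) =====
-- def top_level_from_internal(path: str) -> str:
--     p = path.replace("\\", "/").lstrip("/")
--     return (p.split("/")[0] if p else "").lower()
--
-- def categorize_info_paths(paths):
--     tops = [top_level_from_internal(p) for p in paths]
--     tagged = list(zip(tops, paths))
--     levels = [p for t, p in tagged if t == "levels"]
--     vehicles = [p for t, p in tagged if t == "vehicles"]
--     mod_info = [p for t, p in tagged if t == "mod_info"]
--     other = [p for t, p in tagged if t not in ("levels", "vehicles", "mod_info")]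
--     return levels, vehicles, mod_info, other
-- ===== Notes on version B (the rewrite author's own statement) =====
-- stated objective: alternative
-- what changed: Replaces the single dispatching loop with an if/elif/else over four mutable accumulators by a precomputed list of (top, path) tags and four independent filtering comprehensions, one per output bucket.
import Mathlib
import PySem

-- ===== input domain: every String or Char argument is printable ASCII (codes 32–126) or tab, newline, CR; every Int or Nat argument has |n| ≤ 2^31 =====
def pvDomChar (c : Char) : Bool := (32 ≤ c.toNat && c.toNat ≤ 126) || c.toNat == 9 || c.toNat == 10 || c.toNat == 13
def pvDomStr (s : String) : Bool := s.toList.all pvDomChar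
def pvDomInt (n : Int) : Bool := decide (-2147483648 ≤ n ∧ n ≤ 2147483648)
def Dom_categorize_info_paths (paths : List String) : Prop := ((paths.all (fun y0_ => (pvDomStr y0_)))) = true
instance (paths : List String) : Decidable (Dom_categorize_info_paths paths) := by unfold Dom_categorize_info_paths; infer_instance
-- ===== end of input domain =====

-- B restates A's one dispatching loop as four independent filtering passes (alternative decomposition, same cost).

-- ===== PORT A =====
-- path.lstrip("/"): hand port (no lstrip-with-chars in PySem); exact: drops exactly the leading '/' characters
def pvLstripSlash (s : String) : String := String.ofList (s.toList.dropWhile (· == '/'))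

-- p.split("/")[0]: sep ≠ "" so split? is some and the list is nonempty when p ≠ ""; headD is exact there
def top_level_from_internal (path : String) : String :=
  let p := pvLstripSlash (PySem.Str.replace path "\\" "/")
  PySem.Str.lower (if p ≠ "" then ((PySem.Str.split? p "/").getD []).headD "" else "")

def categorize_info_paths (paths : List String) : List String × List String × List String × List String :=
  paths.foldl (fun (acc : List String × List String × List String × List String) p =>
    let (levels, vehicles, mod_info, other) := acc
    let top := top_level_from_internal p
    if top == "levels" then (levels ++ [p], vehicles, mod_info, other)
    else if top == "vehicles" then (levels, vehicles ++ [p], mod_info, other)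
    else if top == "mod_info" then (levels, vehicles, mod_info ++ [p], other)
    else (levels, vehicles, mod_info, other ++ [p])) ([], [], [], [])

-- ===== PORT B =====
def categorize_info_paths_alt (paths : List String) : List String × List String × List String × List String :=
  let tagged := (paths.map top_level_from_internal).zip paths
  let levels := (tagged.filter (fun tp => tp.1 == "levels")).map (·.2)
  let vehicles := (tagged.filter (fun tp => tp.1 == "vehicles")).map (·.2)
  let mod_info := (tagged.filter (fun tp => tp.1 == "mod_info")).map (·.2)
  let other := (tagged.filter (fun tp => !(tp.1 == "levels" || tp.1 == "vehicles" || tp.1 == "mod_info"))).map (·.2)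
  (levels, vehicles, mod_info, other)

-- ===== PRECONDITION & SPEC =====
def Spec_categorize_info_paths (paths : List String) (out : List String × List String × List String × List String) : Prop := out = categorize_info_paths_alt paths
instance (paths : List String) (out : List String × List String × List String × List String) : Decidable (Spec_categorize_info_paths paths out) := by unfold Spec_categorize_info_paths; infer_instance

-- ===== CLAIM (what is proved, stated in full; the proofs are below) =====
def Claim_equal_categorize_info_paths : Prop := ∀ (paths : List String), Dom_categorize_info_paths paths → Spec_categorize_info_paths paths (categorize_info_paths paths)

-- ===== LEMMAS AND PROOFS =====
theorem catA_loop (paths l v m o : List String) :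
    paths.foldl (fun (acc : List String × List String × List String × List String) p =>
      let (levels, vehicles, mod_info, other) := acc
      let top := top_level_from_internal p
      if top == "levels" then (levels ++ [p], vehicles, mod_info, other)
      else if top == "vehicles" then (levels, vehicles ++ [p], mod_info, other)
      else if top == "mod_info" then (levels, vehicles, mod_info ++ [p], other)
      else (levels, vehicles, mod_info, other ++ [p])) (l, v, m, o)
    = let tagged := (paths.map top_level_from_internal).zip paths
      (l ++ (tagged.filter (fun tp => tp.1 == "levels")).map (·.2),
       v ++ (tagged.filter (fun tp => tp.1 == "vehicles")).map (·.2),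
       m ++ (tagged.filter (fun tp => tp.1 == "mod_info")).map (·.2),
       o ++ (tagged.filter (fun tp => !(tp.1 == "levels" || tp.1 == "vehicles" || tp.1 == "mod_info"))).map (·.2)) := by
  induction paths generalizing l v m o with
  | nil => simp
  | cons p rest ih =>
    simp only [List.foldl_cons, List.map_cons, List.zip_cons_cons, List.filter_cons]
    by_cases h1 : top_level_from_internal p = "levels"
    · simpa [h1] using ih (l ++ [p]) v m o
    · by_cases h2 : top_level_from_internal p = "vehicles"
      · simpa [h1, h2] using ih l (v ++ [p]) m o
      · by_cases h3 : top_level_from_internal p = "mod_info"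
        · simpa [h1, h2, h3] using ih l v (m ++ [p]) o
        · simpa [h1, h2, h3] using ih l v m (o ++ [p])

-- ===== VERDICT (by name: the statement is the Claim_ definition above) =====
theorem categorize_info_paths_spec : Claim_equal_categorize_info_paths := by
  intro paths _
  unfold Spec_categorize_info_paths categorize_info_paths categorize_info_paths_alt
  simpa using catA_loop paths [] [] [] []
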